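-- pv_equiv track=rewrite | github.com/AnthonyMichaelTDM/DRG-Save-Editor | src/main/python/main.py | build_oc_dict
-- ===== SOURCE A (Python) =====
-- from typing import Any
--
-- def build_oc_dict(guid_dict: dict[str, Any]) -> dict[str, Any]:
--     overclocks: dict[str, Any] = dict()
--
--     for v in guid_dict.values():
--         try:
--             overclocks.update({v["class"]: dict()})
--         except:
--             pass
--
--     for v in guid_dict.values():
--         try:
--             overclocks[v["class"]].update({v["weapon"]: dict()})
--         except:
--             pass
--
--     for k, v in guid_dict.items():
--         try:
--             overclocks[v["class"]][v["weapon"]].update({v["name"]: k})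
--         except:
--             pass
--
--     return overclocks
-- ===== SOURCE B (Python) =====
-- def build_oc_dict(guid_dict):
--     overclocks = {}
--     for k, v in guid_dict.items():
--         try:
--             weapons = overclocks.setdefault(v["class"], {})
--             names = weapons.setdefault(v["weapon"], {})
--             names[v["name"]] = k
--         except KeyError:
--             pass
--     return overclocks
-- ===== Notes on version B (the rewrite author's own statement) =====
-- stated objective: simpler
-- what changed: Replaces A's three separate passes over guid_dict (classes, then weapons, then names, each rebuilt with dict.update) with one pass that uses setdefault at each nesting level, so existing sub-dicts are never reset.
import Mathlib
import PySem

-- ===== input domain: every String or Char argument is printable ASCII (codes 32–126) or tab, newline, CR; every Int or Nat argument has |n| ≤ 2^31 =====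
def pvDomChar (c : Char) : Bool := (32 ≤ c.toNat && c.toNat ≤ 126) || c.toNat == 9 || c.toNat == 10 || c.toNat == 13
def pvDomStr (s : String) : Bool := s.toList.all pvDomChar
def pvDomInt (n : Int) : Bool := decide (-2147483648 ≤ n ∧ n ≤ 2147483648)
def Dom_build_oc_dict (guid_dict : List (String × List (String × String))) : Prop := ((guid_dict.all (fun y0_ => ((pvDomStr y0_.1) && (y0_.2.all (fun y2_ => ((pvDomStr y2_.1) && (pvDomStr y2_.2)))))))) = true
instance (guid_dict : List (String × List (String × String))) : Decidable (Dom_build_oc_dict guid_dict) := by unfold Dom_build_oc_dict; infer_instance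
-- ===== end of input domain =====

-- B replaces A's three passes (classes, weapons, names) by one setdefault-based pass: simpler.

-- Python dicts are List (κ × ν) here; these wrappers apply PySem.Dict primitives to such lists.
def dGet {ν : Type} (d : List (String × ν)) (k : String) : Option ν :=
  (PySem.Dict.mk d).get? k

def dIns {ν : Type} (d : List (String × ν)) (k : String) (v : ν) : List (String × ν) :=
  ((PySem.Dict.mk d).insert k v).items

def dSetdefault {ν : Type} (d : List (String × ν)) (k : String) (v : ν) : List (String × ν) :=
  ((PySem.Dict.mk d).setdefault k v).items

-- ===== PORT A =====
-- pass 1: for v in guid_dict.values(): overclocks.update({v["class"]: dict()})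
def aStep1 (oc : List (String × List (String × List (String × String))))
    (kv : String × List (String × String)) : List (String × List (String × List (String × String))) :=
  match dGet kv.2 "class" with
  | none => oc                      -- KeyError: except: pass
  | some c => dIns oc c []

-- pass 2: overclocks[v["class"]].update({v["weapon"]: dict()})
def aStep2 (oc : List (String × List (String × List (String × String))))
    (kv : String × List (String × String)) : List (String × List (String × List (String × String))) :=
  match dGet kv.2 "class" with
  | none => oc
  | some c =>
    match dGet oc c with
    | none => oc                    -- KeyError on overclocks[...]
    | some wd =>
      match dGet kv.2 "weapon" with
      | none => oc
      | some w => dIns oc c (dIns wd w [])   -- in-place mutation of the inner dict, written back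

-- pass 3: overclocks[v["class"]][v["weapon"]].update({v["name"]: k})
def aStep3 (oc : List (String × List (String × List (String × String))))
    (kv : String × List (String × String)) : List (String × List (String × List (String × String))) :=
  match dGet kv.2 "class" with
  | none => oc
  | some c =>
    match dGet oc c with
    | none => oc
    | some wd =>
      match dGet kv.2 "weapon" with
      | none => oc
      | some w =>
        match dGet wd w with
        | none => oc
        | some nd =>
          match dGet kv.2 "name" with
          | none => oc
          | some n => dIns oc c (dIns wd w (dIns nd n kv.1))

def build_oc_dict (guid_dict : List (String × List (String × String))) : List (String × List (String × List (String × String))) :=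
  let oc := guid_dict.foldl aStep1 []
  let oc := guid_dict.foldl aStep2 oc
  guid_dict.foldl aStep3 oc

-- ===== PORT B =====
-- one pass; setdefault returns the (possibly fresh) inner dict, mutations are written back
def bStep (oc : List (String × List (String × List (String × String))))
    (kv : String × List (String × String)) : List (String × List (String × List (String × String))) :=
  match dGet kv.2 "class" with
  | none => oc                      -- KeyError: pass
  | some c =>
    let oc := dSetdefault oc c []                     -- weapons = overclocks.setdefault(v["class"], {})
    let wd := (dGet oc c).getD []
    match dGet kv.2 "weapon" with
    | none => oc
    | some w =>
      let wd := dSetdefault wd w []                   -- names = weapons.setdefault(v["weapon"], {})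
      let oc := dIns oc c wd                          -- mutation of weapons is visible in overclocks
      match dGet kv.2 "name" with
      | none => oc
      | some n => dIns oc c (dIns wd w (dIns ((dGet wd w).getD []) n kv.1))   -- names[v["name"]] = k

def build_oc_dict_alt (guid_dict : List (String × List (String × String))) : List (String × List (String × List (String × String))) :=
  guid_dict.foldl bStep []

-- ===== PRECONDITION & SPEC =====
def Spec_build_oc_dict (guid_dict : List (String × List (String × String))) (out : List (String × List (String × List (String × String)))) : Prop := out = build_oc_dict_alt guid_dict
instance (guid_dict : List (String × List (String × String))) (out : List (String × List (String × List (String × String)))) : Decidable (Spec_build_oc_dict guid_dict out) := by unfold Spec_build_oc_dict; infer_instance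

-- ===== CLAIM (what is proved, stated in full; the proofs are below) =====
def Claim_equal_build_oc_dict : Prop := ∀ (guid_dict : List (String × List (String × String))), Dom_build_oc_dict guid_dict → Spec_build_oc_dict guid_dict (build_oc_dict guid_dict)

-- ===== LEMMAS AND PROOFS =====
def upd {β : Type} (f : String → β) (a : String) (v : β) : String → β := fun c => if c = a then v else f c

def addNew (a : String) (cs : List String) : List String := if a ∈ cs then cs else cs ++ [a]

-- core dictionary-on-rendered-map lemmas
theorem dGet_rmap {β : Type} (cs : List String) (f : String → β) (a : String) :
    dGet (cs.map fun c => (c, f c)) a = if a ∈ cs then some (f a) else none := by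
  induction cs with
  | nil => simp [dGet, PySem.Dict.get?]
  | cons c cs ih =>
    by_cases h : c = a
    · subst h; simp [dGet, PySem.Dict.get?_mk_cons]
    · simp only [List.map_cons, dGet, PySem.Dict.get?_mk_cons] at *
      simp [h, ih, Ne.symm h, beq_iff_eq]

theorem dIns_rmap {β : Type} (cs : List String) (f : String → β) (a : String) (v : β) :
    dIns (cs.map fun c => (c, f c)) a v = (addNew a cs).map (fun c => (c, upd f a v c)) := by
  by_cases h : a ∈ cs
  · simp only [dIns, PySem.Dict.items_insert, PySem.Dict.contains_mk, addNew, h, if_pos]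
    rw [if_pos (by simp only [List.any_map, List.any_eq_true]; exact ⟨a, h, by simp⟩)]
    simp only [List.map_map]
    apply List.map_congr_left
    intro c _
    by_cases hc : c = a
    · subst hc; simp [upd]
    · simp [Function.comp, hc, upd, beq_iff_eq]
  · simp only [dIns, PySem.Dict.items_insert, PySem.Dict.contains_mk, addNew, if_neg h]
    rw [if_neg (by simp only [List.any_map, List.any_eq_true, not_exists]; intro x; simp only [Function.comp, beq_iff_eq, not_and]; exact fun hx e => h (e ▸ hx))]
    rw [List.map_append]
    congr 1
    · apply List.map_congr_left
      intro c hc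
      have : c ≠ a := fun e => h (e ▸ hc)
      simp [upd, this]
    · simp [upd]

theorem rmap_contains {β : Type} (cs : List String) (f : String → β) (a : String) :
    (PySem.Dict.mk (cs.map fun c => (c, f c))).contains a = decide (a ∈ cs) := by
  rw [PySem.Dict.contains_eq_decide_mem_keys, PySem.Dict.keys_mk]
  simp

theorem dSetdefault_rmap {β : Type} (cs : List String) (f : String → β) (a : String) (v : β)
    (hv : a ∉ cs → f a = v) :
    dSetdefault (cs.map fun c => (c, f c)) a v = (addNew a cs).map (fun c => (c, f c)) := by
  by_cases h : a ∈ cs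
  · unfold dSetdefault
    rw [PySem.Dict.setdefault_of_contains _ v (by rw [rmap_contains]; simpa)]
    simp [addNew, h]
  · unfold dSetdefault
    rw [PySem.Dict.setdefault_of_not_contains _ v (by rw [rmap_contains]; simpa)]
    have := dIns_rmap cs f a v
    unfold dIns at this
    rw [this]
    apply List.map_congr_left
    intro c hc
    by_cases hca : c = a
    · subst hca; simp [upd, hv h]
    · simp [upd, hca]

-- abstract per-component folds
def csF (cs : List String) (l : List (String × List (String × String))) : List String :=
  l.foldl (fun cs kv => match dGet kv.2 "class" with | some c => addNew c cs | none => cs) cs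

def wF (W : String → List String) (l : List (String × List (String × String))) : String → List String :=
  l.foldl (fun W kv => match dGet kv.2 "class", dGet kv.2 "weapon" with
    | some c, some w => upd W c (addNew w (W c)) | _, _ => W) W

def nF (N : String → String → List (String × String)) (l : List (String × List (String × String))) :
    String → String → List (String × String) :=
  l.foldl (fun N kv => match dGet kv.2 "class", dGet kv.2 "weapon", dGet kv.2 "name" with
    | some c, some w, some n => upd N c (upd (N c) w (dIns (N c w) n kv.1)) | _, _, _ => N) N

theorem mem_addNew (a b : String) (cs : List String) (h : b ∈ cs) : b ∈ addNew a cs := by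
  unfold addNew; split <;> simp [h]

theorem mem_addNew_self (a : String) (cs : List String) : a ∈ addNew a cs := by
  unfold addNew; split <;> simp_all

theorem csF_mono (l : List (String × List (String × String))) (cs : List String) (a : String)
    (h : a ∈ cs) : a ∈ csF cs l := by
  induction l generalizing cs with
  | nil => exact h
  | cons kv t ih =>
    unfold csF; simp only [List.foldl_cons]
    cases dGet kv.2 "class" with
    | none => exact ih cs h
    | some c => exact ih _ (mem_addNew c a cs h)

theorem csF_mem (l : List (String × List (String × String))) (cs : List String)
    (kv : String × List (String × String)) (c : String)
    (hm : kv ∈ l) (hc : dGet kv.2 "class" = some c) : c ∈ csF cs l := by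
  induction l generalizing cs with
  | nil => cases hm
  | cons kv' t ih =>
    unfold csF; simp only [List.foldl_cons]
    rcases List.mem_cons.1 hm with rfl | hm'
    · rw [hc]; exact csF_mono t _ c (mem_addNew_self c cs)
    · cases dGet kv'.2 "class" <;> exact ih _ hm'

theorem wF_mono (l : List (String × List (String × String))) (W : String → List String)
    (c w : String) (h : w ∈ W c) : w ∈ wF W l c := by
  induction l generalizing W with
  | nil => exact h
  | cons kv t ih =>
    unfold wF; simp only [List.foldl_cons]
    cases hc : dGet kv.2 "class" with
    | none => exact ih W h
    | some c' =>
      cases hw : dGet kv.2 "weapon" with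
      | none => exact ih W h
      | some w' =>
        apply ih
        by_cases e : c = c'
        · subst e; simp [upd, mem_addNew _ _ _ h]
        · simpa [upd, e] using h

theorem wF_mem (l : List (String × List (String × String))) (W : String → List String)
    (kv : String × List (String × String)) (c w : String)
    (hm : kv ∈ l) (hc : dGet kv.2 "class" = some c) (hw : dGet kv.2 "weapon" = some w) :
    w ∈ wF W l c := by
  induction l generalizing W with
  | nil => cases hm
  | cons kv' t ih =>
    unfold wF; simp only [List.foldl_cons]
    rcases List.mem_cons.1 hm with rfl | hm'
    · rw [hc, hw]
      exact wF_mono t _ c w (by simp [upd, mem_addNew_self])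
    · cases dGet kv'.2 "class" <;> cases dGet kv'.2 "weapon" <;> exact ih _ hm'

theorem map_key_congr {β : Type} (cs : List String) (f g : String → β) (h : ∀ c, f c = g c) :
    cs.map (fun c => (c, f c)) = cs.map (fun c => (c, g c)) := by
  have : f = g := funext h
  rw [this]

theorem upd_const {β : Type} (a : String) (v : β) : upd (fun _ => v) a v = (fun _ => v) := by
  funext c; simp [upd]

-- pass 1 of A builds the class skeleton
theorem aStep1_rmap (cs : List String) (kv : String × List (String × String)) :
    aStep1 (cs.map fun c => (c, ([] : List (String × List (String × String))))) kv =
      ((match dGet kv.2 "class" with | none => cs | some c => addNew c cs).map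
        (fun c => (c, []))) := by
  unfold aStep1
  cases hc : dGet kv.2 "class" with
  | none => rfl
  | some c =>
    show dIns (cs.map fun c' => (c', ([] : List (String × List (String × String))))) c [] =
      (addNew c cs).map fun c' => (c', [])
    rw [dIns_rmap cs _ c []]
    exact map_key_congr _ _ _ (fun c' => by by_cases e : c' = c <;> simp [upd, e])

theorem passA1 (l : List (String × List (String × String))) (cs : List String) :
    l.foldl aStep1 (cs.map fun c => (c, ([] : List (String × List (String × String))))) =
      (csF cs l).map (fun c => (c, [])) := by
  induction l generalizing cs with
  | nil => rfl
  | cons kv t ih =>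
    simp only [List.foldl_cons]
    rw [aStep1_rmap cs kv]
    cases hc : dGet kv.2 "class" with
    | none =>
      show List.foldl aStep1 (cs.map fun c => (c, [])) t = _
      rw [ih cs]; unfold csF; simp [hc]
    | some c =>
      show List.foldl aStep1 ((addNew c cs).map fun c => (c, [])) t = _
      rw [ih (addNew c cs)]; unfold csF; simp [hc]

theorem addNew_of_mem (a : String) (cs : List String) (h : a ∈ cs) : addNew a cs = cs := by
  simp [addNew, h]

-- pass 2 of A fills the weapon skeletons
theorem passA2 (l : List (String × List (String × String))) (cs : List String)
    (W : String → List String)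
    (hyp : ∀ kv ∈ l, ∀ c, dGet kv.2 "class" = some c → c ∈ cs) :
    l.foldl aStep2 (cs.map fun c => (c, (W c).map fun w => (w, ([] : List (String × String))))) =
      cs.map (fun c => (c, (wF W l c).map fun w => (w, []))) := by
  induction l generalizing W with
  | nil => rfl
  | cons kv t ih =>
    simp only [List.foldl_cons]
    have hyp' : ∀ kv' ∈ t, ∀ c, dGet kv'.2 "class" = some c → c ∈ cs :=
      fun kv' h' => hyp kv' (List.mem_cons_of_mem kv h')
    cases hc : dGet kv.2 "class" with
    | none =>
      have step : aStep2 (cs.map fun c => (c, (W c).map fun w => (w, ([] : List (String × String))))) kv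
          = cs.map fun c => (c, (W c).map fun w => (w, [])) := by
        unfold aStep2; rw [hc]
      rw [step, ih W hyp']
      unfold wF; simp [hc]
    | some c =>
      have hm : c ∈ cs := hyp kv (List.mem_cons_self) c hc
      cases hw : dGet kv.2 "weapon" with
      | none =>
        have step : aStep2 (cs.map fun c => (c, (W c).map fun w => (w, ([] : List (String × String))))) kv
            = cs.map fun c => (c, (W c).map fun w => (w, [])) := by
          unfold aStep2
          rw [hc]
          show (match dGet (cs.map fun c => (c, (W c).map fun w => (w, ([] : List (String × String))))) c with
            | none => (cs.map fun c => (c, (W c).map fun w => (w, ([] : List (String × String)))))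
            | some wd =>
              match dGet kv.2 "weapon" with
              | none => (cs.map fun c => (c, (W c).map fun w => (w, ([] : List (String × String)))))
              | some w => dIns (cs.map fun c => (c, (W c).map fun w => (w, ([] : List (String × String))))) c (dIns wd w [])) = _
          rw [dGet_rmap cs _ c, if_pos hm, hw]
        rw [step, ih W hyp']
        unfold wF; simp [hc, hw]
      | some w =>
        have step : aStep2 (cs.map fun c => (c, (W c).map fun w => (w, ([] : List (String × String))))) kv
            = cs.map fun c' => (c', ((upd W c (addNew w (W c))) c').map fun w' => (w', [])) := by
          unfold aStep2
          rw [hc]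
          show (match dGet (cs.map fun c => (c, (W c).map fun w => (w, ([] : List (String × String))))) c with
            | none => (cs.map fun c => (c, (W c).map fun w => (w, ([] : List (String × String)))))
            | some wd =>
              match dGet kv.2 "weapon" with
              | none => (cs.map fun c => (c, (W c).map fun w => (w, ([] : List (String × String)))))
              | some w => dIns (cs.map fun c => (c, (W c).map fun w => (w, ([] : List (String × String))))) c (dIns wd w [])) = _
          rw [dGet_rmap cs _ c, if_pos hm, hw]
          show dIns (cs.map fun c => (c, (W c).map fun w => (w, ([] : List (String × String))))) c
              (dIns ((W c).map fun w => (w, ([] : List (String × String)))) w []) = _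
          rw [dIns_rmap (W c) (fun _ => []) w [], upd_const,
              dIns_rmap cs (fun c => (W c).map fun w => (w, ([] : List (String × String)))) c _,
              addNew_of_mem c cs hm]
          exact map_key_congr _ _ _ (fun c' => by by_cases e : c' = c <;> simp [upd, e])
        rw [step, ih (upd W c (addNew w (W c))) hyp']
        unfold wF; simp [hc, hw]

-- pass 3 of A fills the name dictionaries
theorem passA3 (l : List (String × List (String × String))) (cs : List String)
    (W : String → List String) (N : String → String → List (String × String))
    (hyp1 : ∀ kv ∈ l, ∀ c, dGet kv.2 "class" = some c → c ∈ cs)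
    (hyp2 : ∀ kv ∈ l, ∀ c w, dGet kv.2 "class" = some c → dGet kv.2 "weapon" = some w → w ∈ W c) :
    l.foldl aStep3 (cs.map fun c => (c, (W c).map fun w => (w, N c w))) =
      cs.map (fun c => (c, (W c).map fun w => (w, nF N l c w))) := by
  induction l generalizing N with
  | nil => rfl
  | cons kv t ih =>
    simp only [List.foldl_cons]
    have hyp1' : ∀ kv' ∈ t, ∀ c, dGet kv'.2 "class" = some c → c ∈ cs :=
      fun kv' h' => hyp1 kv' (List.mem_cons_of_mem kv h')
    have hyp2' : ∀ kv' ∈ t, ∀ c w, dGet kv'.2 "class" = some c → dGet kv'.2 "weapon" = some w → w ∈ W c :=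
      fun kv' h' => hyp2 kv' (List.mem_cons_of_mem kv h')
    cases hc : dGet kv.2 "class" with
    | none =>
      have step : aStep3 (cs.map fun c => (c, (W c).map fun w => (w, N c w))) kv
          = cs.map fun c => (c, (W c).map fun w => (w, N c w)) := by
        unfold aStep3; rw [hc]
      rw [step, ih N hyp1' hyp2']
      unfold nF; simp [hc]
    | some c =>
      have hm : c ∈ cs := hyp1 kv List.mem_cons_self c hc
      cases hw : dGet kv.2 "weapon" with
      | none =>
        have step : aStep3 (cs.map fun c => (c, (W c).map fun w => (w, N c w))) kv
            = cs.map fun c => (c, (W c).map fun w => (w, N c w)) := by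
          unfold aStep3
          rw [hc]
          show (match dGet (cs.map fun c => (c, (W c).map fun w => (w, N c w))) c with
            | none => (cs.map fun c => (c, (W c).map fun w => (w, N c w)))
            | some wd =>
              match dGet kv.2 "weapon" with
              | none => (cs.map fun c => (c, (W c).map fun w => (w, N c w)))
              | some w =>
                match dGet wd w with
                | none => (cs.map fun c => (c, (W c).map fun w => (w, N c w)))
                | some nd =>
                  match dGet kv.2 "name" with
                  | none => (cs.map fun c => (c, (W c).map fun w => (w, N c w)))
                  | some n => dIns (cs.map fun c => (c, (W c).map fun w => (w, N c w))) c (dIns wd w (dIns nd n kv.1))) = _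
          rw [dGet_rmap cs _ c, if_pos hm, hw]
        rw [step, ih N hyp1' hyp2']
        unfold nF; simp [hc, hw]
      | some w =>
        have hwm : w ∈ W c := hyp2 kv List.mem_cons_self c w hc hw
        cases hn : dGet kv.2 "name" with
        | none =>
          have step : aStep3 (cs.map fun c => (c, (W c).map fun w => (w, N c w))) kv
              = cs.map fun c => (c, (W c).map fun w => (w, N c w)) := by
            unfold aStep3
            rw [hc]
            show (match dGet (cs.map fun c => (c, (W c).map fun w => (w, N c w))) c with
              | none => (cs.map fun c => (c, (W c).map fun w => (w, N c w)))
              | some wd =>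
                match dGet kv.2 "weapon" with
                | none => (cs.map fun c => (c, (W c).map fun w => (w, N c w)))
                | some w =>
                  match dGet wd w with
                  | none => (cs.map fun c => (c, (W c).map fun w => (w, N c w)))
                  | some nd =>
                    match dGet kv.2 "name" with
                    | none => (cs.map fun c => (c, (W c).map fun w => (w, N c w)))
                    | some n => dIns (cs.map fun c => (c, (W c).map fun w => (w, N c w))) c (dIns wd w (dIns nd n kv.1))) = _
            rw [dGet_rmap cs _ c, if_pos hm, hw]
            show (match dGet ((W c).map fun w' => (w', N c w')) w with
              | none => (cs.map fun c => (c, (W c).map fun w => (w, N c w)))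
              | some nd =>
                match dGet kv.2 "name" with
                | none => (cs.map fun c => (c, (W c).map fun w => (w, N c w)))
                | some n => dIns (cs.map fun c => (c, (W c).map fun w => (w, N c w))) c
                    (dIns ((W c).map fun w' => (w', N c w')) w (dIns nd n kv.1))) = _
            rw [dGet_rmap (W c) (N c) w, if_pos hwm, hn]
          rw [step, ih N hyp1' hyp2']
          unfold nF; simp [hc, hw, hn]
        | some n =>
          have step : aStep3 (cs.map fun c => (c, (W c).map fun w => (w, N c w))) kv
              = cs.map fun c' => (c', (W c').map fun w' =>
                  (w', (upd N c (upd (N c) w (dIns (N c w) n kv.1))) c' w')) := by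
            unfold aStep3
            rw [hc]
            show (match dGet (cs.map fun c => (c, (W c).map fun w => (w, N c w))) c with
              | none => (cs.map fun c => (c, (W c).map fun w => (w, N c w)))
              | some wd =>
                match dGet kv.2 "weapon" with
                | none => (cs.map fun c => (c, (W c).map fun w => (w, N c w)))
                | some w =>
                  match dGet wd w with
                  | none => (cs.map fun c => (c, (W c).map fun w => (w, N c w)))
                  | some nd =>
                    match dGet kv.2 "name" with
                    | none => (cs.map fun c => (c, (W c).map fun w => (w, N c w)))
                    | some n => dIns (cs.map fun c => (c, (W c).map fun w => (w, N c w))) c (dIns wd w (dIns nd n kv.1))) = _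
            rw [dGet_rmap cs _ c, if_pos hm, hw]
            show (match dGet ((W c).map fun w' => (w', N c w')) w with
              | none => (cs.map fun c => (c, (W c).map fun w => (w, N c w)))
              | some nd =>
                match dGet kv.2 "name" with
                | none => (cs.map fun c => (c, (W c).map fun w => (w, N c w)))
                | some n => dIns (cs.map fun c => (c, (W c).map fun w => (w, N c w))) c
                    (dIns ((W c).map fun w' => (w', N c w')) w (dIns nd n kv.1))) = _
            rw [dGet_rmap (W c) (N c) w, if_pos hwm, hn]
            show dIns (cs.map fun c => (c, (W c).map fun w => (w, N c w))) c
                (dIns ((W c).map fun w => (w, N c w)) w (dIns (N c w) n kv.1)) = _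
            rw [dIns_rmap (W c) (N c) w _, addNew_of_mem w (W c) hwm,
                dIns_rmap cs (fun c => (W c).map fun w => (w, N c w)) c _,
                addNew_of_mem c cs hm]
            apply map_key_congr
            intro c'
            by_cases e : c' = c
            · subst e
              simp [upd]
            · simp [upd, e]
          rw [step, ih (upd N c (upd (N c) w (dIns (N c w) n kv.1))) hyp1' hyp2']
          unfold nF; simp [hc, hw, hn]

-- one pass of B builds all three levels at once
theorem passB (l : List (String × List (String × String))) (cs : List String)
    (W : String → List String) (N : String → String → List (String × String))
    (hW : ∀ c, c ∉ cs → W c = [])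
    (hN : ∀ c w, w ∉ W c → N c w = []) :
    l.foldl bStep (cs.map fun c => (c, (W c).map fun w => (w, N c w))) =
      (csF cs l).map (fun c => (c, (wF W l c).map fun w => (w, nF N l c w))) := by
  induction l generalizing cs W N with
  | nil => rfl
  | cons kv t ih =>
    simp only [List.foldl_cons]
    cases hc : dGet kv.2 "class" with
    | none =>
      have step : bStep (cs.map fun c => (c, (W c).map fun w => (w, N c w))) kv
          = cs.map fun c => (c, (W c).map fun w => (w, N c w)) := by
        simp only [bStep, hc]
      rw [step, ih cs W N hW hN]
      unfold csF wF nF; simp [hc]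
    | some c =>
      have hsd : dSetdefault (cs.map fun c => (c, (W c).map fun w => (w, N c w))) c []
          = (addNew c cs).map fun c => (c, (W c).map fun w => (w, N c w)) := by
        apply dSetdefault_rmap
        intro h; rw [hW c h]; rfl
      have hW' : ∀ c', c' ∉ addNew c cs → W c' = [] :=
        fun c' h => hW c' (fun hm => h (mem_addNew c c' cs hm))
      have hget : dGet ((addNew c cs).map fun c => (c, (W c).map fun w => (w, N c w))) c
          = some ((W c).map fun w => (w, N c w)) := by
        rw [dGet_rmap, if_pos (mem_addNew_self c cs)]
      cases hw : dGet kv.2 "weapon" with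
      | none =>
        have step : bStep (cs.map fun c => (c, (W c).map fun w => (w, N c w))) kv
            = (addNew c cs).map fun c => (c, (W c).map fun w => (w, N c w)) := by
          simp only [bStep, hc, hw, hsd]
        rw [step, ih (addNew c cs) W N hW' hN]
        unfold csF wF nF; simp [hc, hw]
      | some w =>
        have hsd2 : dSetdefault ((W c).map fun w => (w, N c w)) w []
            = (addNew w (W c)).map fun w' => (w', N c w') := by
          apply dSetdefault_rmap
          exact hN c w
        have hins : dIns ((addNew c cs).map fun c => (c, (W c).map fun w => (w, N c w))) c
            ((addNew w (W c)).map fun w' => (w', N c w'))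
            = (addNew c cs).map fun c' => (c', ((upd W c (addNew w (W c))) c').map fun w' => (w', N c' w')) := by
          rw [dIns_rmap, addNew_of_mem c (addNew c cs) (mem_addNew_self c cs)]
          exact map_key_congr _ _ _ (fun c' => by by_cases e : c' = c <;> simp [upd, e])
        have hW'' : ∀ c', c' ∉ addNew c cs → (upd W c (addNew w (W c))) c' = [] := by
          intro c' h
          have : c' ≠ c := fun e => h (e ▸ mem_addNew_self c cs)
          simp [upd, this, hW' c' h]
        have hN' : ∀ c' w', w' ∉ (upd W c (addNew w (W c))) c' → N c' w' = [] := by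
          intro c' w' h
          by_cases e : c' = c
          · rw [e]
            have h2 : w' ∉ addNew w (W c) := by simpa [upd, e] using h
            exact hN c w' (fun hm => h2 (mem_addNew w w' (W c) hm))
          · exact hN c' w' (by simpa [upd, e] using h)
        cases hn : dGet kv.2 "name" with
        | none =>
          have step : bStep (cs.map fun c => (c, (W c).map fun w => (w, N c w))) kv
              = (addNew c cs).map fun c' => (c', ((upd W c (addNew w (W c))) c').map fun w' => (w', N c' w')) := by
            simp only [bStep, hc, hw, hn, hsd, hget, Option.getD_some, hsd2, hins]
          rw [step, ih (addNew c cs) (upd W c (addNew w (W c))) N hW'' hN']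
          unfold csF wF nF; simp [hc, hw, hn]
        | some n =>
          have hget2 : dGet ((addNew w (W c)).map fun w' => (w', N c w')) w = some (N c w) := by
            rw [dGet_rmap, if_pos (mem_addNew_self w (W c))]
          have hins2 : dIns ((addNew w (W c)).map fun w' => (w', N c w')) w (dIns (N c w) n kv.1)
              = (addNew w (W c)).map fun w' => (w', (upd (N c) w (dIns (N c w) n kv.1)) w') := by
            rw [dIns_rmap, addNew_of_mem w (addNew w (W c)) (mem_addNew_self w (W c))]
          have hins3 : dIns ((addNew c cs).map fun c' => (c', ((upd W c (addNew w (W c))) c').map fun w' => (w', N c' w'))) c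
              ((addNew w (W c)).map fun w' => (w', (upd (N c) w (dIns (N c w) n kv.1)) w'))
              = (addNew c cs).map fun c' => (c', ((upd W c (addNew w (W c))) c').map fun w' =>
                  (w', (upd N c (upd (N c) w (dIns (N c w) n kv.1))) c' w')) := by
            rw [dIns_rmap, addNew_of_mem c (addNew c cs) (mem_addNew_self c cs)]
            apply map_key_congr
            intro c'
            by_cases e : c' = c
            · subst e; simp [upd]
            · simp [upd, e]
          have step : bStep (cs.map fun c => (c, (W c).map fun w => (w, N c w))) kv
              = (addNew c cs).map fun c' => (c', ((upd W c (addNew w (W c))) c').map fun w' =>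
                  (w', (upd N c (upd (N c) w (dIns (N c w) n kv.1))) c' w')) := by
            simp only [bStep, hc, hw, hn, hsd, hget, Option.getD_some, hsd2, hget2, hins, hins2, hins3]
          have hN'' : ∀ c' w', w' ∉ (upd W c (addNew w (W c))) c' →
              (upd N c (upd (N c) w (dIns (N c w) n kv.1))) c' w' = [] := by
            intro c' w' h
            by_cases e : c' = c
            · have h2 : w' ∉ addNew w (W c) := by simpa [upd, e] using h
              have hww : w' ≠ w := fun e2 => h2 (e2 ▸ mem_addNew_self w (W c))
              have h3 : N c w' = [] := hN c w' (fun hm => h2 (mem_addNew w w' (W c) hm))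
              simp [upd, e, hww, h3]
            · simp only [upd, if_neg e]
              exact hN' c' w' h
          rw [step, ih (addNew c cs) (upd W c (addNew w (W c)))
              (upd N c (upd (N c) w (dIns (N c w) n kv.1))) hW'' hN'']
          unfold csF wF nF; simp [hc, hw, hn]

theorem ab_eq (gd : List (String × List (String × String))) :
    build_oc_dict gd = build_oc_dict_alt gd := by
  have hA1 : gd.foldl aStep1 [] = (csF [] gd).map (fun c => (c, [])) := passA1 gd []
  have hA2 : gd.foldl aStep2 ((csF [] gd).map (fun c => (c, []))) =
      (csF [] gd).map (fun c => (c, (wF (fun _ => []) gd c).map fun w => (w, ([] : List (String × String))))) :=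
    passA2 gd (csF [] gd) (fun _ => []) (fun kv hm c hc => csF_mem gd [] kv c hm hc)
  have hA3 : gd.foldl aStep3 ((csF [] gd).map (fun c => (c, (wF (fun _ => []) gd c).map fun w => (w, ([] : List (String × String)))))) =
      (csF [] gd).map (fun c => (c, (wF (fun _ => []) gd c).map fun w => (w, nF (fun _ _ => []) gd c w))) :=
    passA3 gd (csF [] gd) (wF (fun _ => []) gd) (fun _ _ => [])
      (fun kv hm c hc => csF_mem gd [] kv c hm hc)
      (fun kv hm c w hc hw => wF_mem gd (fun _ => []) kv c w hm hc hw)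
  have hB : gd.foldl bStep [] =
      (csF [] gd).map (fun c => (c, (wF (fun _ => []) gd c).map fun w => (w, nF (fun _ _ => []) gd c w))) :=
    passB gd [] (fun _ => []) (fun _ _ => []) (fun _ _ => rfl) (fun _ _ _ => rfl)
  show gd.foldl aStep3 (gd.foldl aStep2 (gd.foldl aStep1 [])) = gd.foldl bStep []
  rw [hA1, hA2, hA3, hB]

-- ===== VERDICT (by name: the statement is the Claim_ definition above) =====
theorem build_oc_dict_spec : Claim_equal_build_oc_dict := by
  intro gd _
  exact ab_eq gd
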